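-- pv_equiv track=rewrite | github.com/magpieprojects/robo-credit-analyst | app.py | _compile_param_sql
-- ===== SOURCE A (Python) =====
-- from typing import Any
--
-- def _sql_literal(value: Any) -> str:
--     if value is None:
--         return "NULL"
--     if isinstance(value, str):
--         return "'" + value.replace("'", "''") + "'"
--     return str(value)
--
-- def _compile_param_sql(sql: str, params: list[Any]) -> str:
--     normalized_sql = "\n".join(line.rstrip() for line in sql.strip().splitlines())
--     parts = normalized_sql.split("?")
--     if len(parts) - 1 != len(params):
--         return normalized_sql
--
--     rendered_parts: list[str] = [parts[0]]
--     for index, param in enumerate(params):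
--         rendered_parts.append(_sql_literal(param))
--         rendered_parts.append(parts[index + 1])
--     return "".join(rendered_parts).strip()
-- ===== SOURCE B (Python) =====
-- from typing import Any
--
-- def _sql_literal(value: Any) -> str:
--     if value is None:
--         return "NULL"
--     if isinstance(value, str):
--         return "'" + value.replace("'", "''") + "'"
--     return str(value)
--
-- def _compile_param_sql(sql: str, params: list[Any]) -> str:
--     normalized_sql = "\n".join(line.rstrip() for line in sql.strip().splitlines())
--     if normalized_sql.count("?") != len(params):
--         return normalized_sql
--     it = iter(params)
--     return "".join(_sql_literal(next(it)) if ch == "?" else ch for ch in normalized_sql).strip()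
-- ===== Notes on version B (the rewrite author's own statement) =====
-- stated objective: alternative
-- what changed: Instead of splitting the normalized SQL on '?' and interleaving the pieces with rendered literals by index, B guards with a '?' count and makes a single left-to-right scan over the characters, substituting each '?' with the next parameter literal from an iterator.
import Mathlib
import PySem

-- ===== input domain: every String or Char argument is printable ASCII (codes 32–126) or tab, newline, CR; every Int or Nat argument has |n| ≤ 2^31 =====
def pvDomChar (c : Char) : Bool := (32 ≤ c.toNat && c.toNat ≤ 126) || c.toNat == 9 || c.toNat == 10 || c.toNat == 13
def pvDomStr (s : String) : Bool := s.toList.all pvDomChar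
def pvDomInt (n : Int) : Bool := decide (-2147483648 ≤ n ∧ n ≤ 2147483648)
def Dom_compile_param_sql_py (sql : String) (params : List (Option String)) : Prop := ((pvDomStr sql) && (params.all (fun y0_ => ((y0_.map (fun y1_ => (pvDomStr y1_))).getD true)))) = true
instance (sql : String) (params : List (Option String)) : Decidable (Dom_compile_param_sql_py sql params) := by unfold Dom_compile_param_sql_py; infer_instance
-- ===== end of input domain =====

-- B replaces the split-and-interleave assembly by a count guard plus a single left-to-right
-- scan that substitutes each '?' with the next parameter literal (objective: alternative decomposition).


-- ===== PORT A =====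
-- shared module helper _sql_literal (params are Optional[str] here)
def sqlLiteralPy (value : Option String) : String :=
  match value with
  | none => "NULL"
  | some s => "'" ++ PySem.Str.replace s "'" "''" ++ "'"

-- the 'for index, param in enumerate(params)' loop of A (index carried explicitly)
def renderLoopA (parts : List String) : Nat → List (Option String) → List String → List String
  | _, [], acc => acc
  | i, p :: ps, acc => renderLoopA parts (i+1) ps ((acc ++ [sqlLiteralPy p]) ++ [parts.getD (i+1) ""])

def compile_param_sql_py (sql : String) (params : List (Option String)) : String :=
  let normalized := PySem.Str.join "\n" ((PySem.Str.splitlines (PySem.Str.strip sql)).map PySem.Str.rstrip)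
  let parts := (PySem.Str.split? normalized "?").getD []   -- sep "?" is nonempty: split? is always `some`
  if parts.length - 1 ≠ params.length then normalized
  else PySem.Str.strip (PySem.Str.join "" (renderLoopA parts 0 params [parts.getD 0 ""]))

-- ===== PORT B =====
-- B's generator: one pass over the characters, consuming the params iterator at each '?'
def scanReplace : List Char → List (Option String) → List Char
  | [], _ => []
  | c :: cs, ps =>
    if c = '?' then
      match ps with
      | p :: ps' => (sqlLiteralPy p).toList ++ scanReplace cs ps'
      | [] => scanReplace cs []   -- unreachable under the count guard
    else c :: scanReplace cs ps

def compile_param_sql_py_alt (sql : String) (params : List (Option String)) : String :=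
  let normalized := PySem.Str.join "\n" ((PySem.Str.splitlines (PySem.Str.strip sql)).map PySem.Str.rstrip)
  if PySem.Str.count normalized "?" ≠ params.length then normalized
  else PySem.Str.strip (String.ofList (scanReplace normalized.toList params))

-- ===== PRECONDITION & SPEC =====
def Spec_compile_param_sql_py (sql : String) (params : List (Option String)) (out : String) : Prop := out = compile_param_sql_py_alt sql params
instance (sql : String) (params : List (Option String)) (out : String) : Decidable (Spec_compile_param_sql_py sql params out) := by unfold Spec_compile_param_sql_py; infer_instance

-- ===== CLAIM (what is proved, stated in full; the proofs are below) =====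
def Claim_equal_compile_param_sql_py : Prop := ∀ (sql : String) (params : List (Option String)), Dom_compile_param_sql_py sql params → Spec_compile_param_sql_py sql params (compile_param_sql_py sql params)

-- ===== LEMMAS AND PROOFS =====

-- simple structural model of Python's str.split('?') (single-character separator)
def mySplit (pre : List Char) : List Char → List (List Char)
  | [] => [pre]
  | a :: rest => if a = '?' then pre :: mySplit [] rest else mySplit (pre ++ [a]) rest

theorem countGo_char (l : List Char) : ∀ (fuel acc : Nat), l.length ≤ fuel →
    PySem.Chars.count.go ['?'] fuel l acc = acc + l.count '?' := by
  induction l with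
  | nil => intro fuel acc h; cases fuel <;> rw [PySem.Chars.count.go] <;> simp
  | cons a t ih =>
    intro fuel acc h
    cases fuel with
    | zero => simp at h
    | succ f =>
      rw [PySem.Chars.count.go]
      by_cases ha : a = '?'
      · subst ha
        rw [if_pos (by simp [List.isPrefixOf])]
        rw [show List.drop ['?'].length ('?' :: t) = t from rfl]
        rw [ih f (acc+1) (by simpa using h)]
        simp; omega
      · rw [if_neg (by simp [List.isPrefixOf]; exact fun h => absurd h.symm ha)]
        rw [ih f acc (by simpa using h)]
        simp [ha]

theorem splitOnGo_char (l : List Char) : ∀ (fuel : Nat) (cur : List Char) (acc : List (List Char)),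
    l.length ≤ fuel →
    PySem.Chars.splitOn.go ['?'] fuel l cur acc = acc.reverse ++ mySplit cur.reverse l := by
  induction l with
  | nil => intro fuel cur acc h; cases fuel <;> rw [PySem.Chars.splitOn.go] <;> simp [mySplit]
  | cons a t ih =>
    intro fuel cur acc h
    cases fuel with
    | zero => simp at h
    | succ f =>
      rw [PySem.Chars.splitOn.go]
      by_cases ha : a = '?'
      · subst ha
        rw [if_pos (by simp [List.isPrefixOf])]
        rw [show List.drop ['?'].length ('?' :: t) = t from rfl]
        rw [ih f [] (cur.reverse :: acc) (by simpa using h)]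
        simp [mySplit]
      · rw [if_neg (by simp [List.isPrefixOf]; exact fun h => absurd h.symm ha)]
        rw [ih f (a :: cur) acc (by simpa using h)]
        simp [mySplit, ha]

theorem mySplit_length (l : List Char) : ∀ pre, (mySplit pre l).length = l.count '?' + 1 := by
  induction l with
  | nil => intro pre; simp [mySplit]
  | cons a t ih =>
    intro pre
    by_cases ha : a = '?'
    · subst ha; simp [mySplit, ih]
    · simp [mySplit, ha, ih]

theorem mySplit_ne_nil (l : List Char) (pre : List Char) : mySplit pre l ≠ [] := by
  have := mySplit_length l pre
  intro h; rw [h] at this; simp at this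

theorem renderLoopA_eq (parts : List String) (ps : List (Option String)) :
    ∀ (i : Nat) (acc : List String), i + ps.length + 1 ≤ parts.length →
    renderLoopA parts i ps acc
      = acc ++ (ps.zip (parts.drop (i+1))).flatMap (fun pq => [sqlLiteralPy pq.1, pq.2]) := by
  induction ps with
  | nil => intro i acc h; simp [renderLoopA]
  | cons p ps ih =>
    intro i acc h
    simp only [renderLoopA]
    rw [ih (i+1) _ (by simp at h ⊢; omega)]
    have hlt : i + 1 < parts.length := by simp at h; omega
    conv_rhs => rw [List.drop_eq_getElem_cons hlt, List.zip_cons_cons, List.flatMap_cons]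
    simp [List.getD, List.getElem?_eq_getElem hlt]

theorem interleave_eq_scan (cs : List Char) : ∀ (ps : List (Option String)) (pre : List Char),
    cs.count '?' = ps.length →
    (mySplit pre cs).headI
      ++ (ps.zip ((mySplit pre cs).drop 1)).flatMap (fun pq => (sqlLiteralPy pq.1).toList ++ pq.2)
      = pre ++ scanReplace cs ps := by
  induction cs with
  | nil =>
    intro ps pre h
    have hps : ps = [] := List.eq_nil_of_length_eq_zero h.symm
    subst hps; simp [mySplit, scanReplace]
  | cons a t ih =>
    intro ps pre h
    by_cases ha : a = '?'
    · subst ha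
      simp only [List.count_cons] at h
      match ps with
      | [] => simp at h
      | p :: ps' =>
        have hcnt : t.count '?' = ps'.length := by simp at h; omega
        rw [show mySplit pre ('?'::t) = pre :: mySplit [] t from by simp [mySplit]]
        rw [show scanReplace ('?'::t) (p::ps') = (sqlLiteralPy p).toList ++ scanReplace t ps' from by simp [scanReplace]]
        obtain ⟨hd, tl, hht⟩ : ∃ hd tl, mySplit ([] : List Char) t = hd :: tl := by
          cases hms : mySplit ([] : List Char) t with
          | nil => exact absurd hms (mySplit_ne_nil t [])
          | cons h t2 => exact ⟨h, t2, rfl⟩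
        have := ih ps' [] hcnt
        rw [hht] at this ⊢
        simp only [List.headI, List.drop_one, List.tail_cons, List.nil_append] at this
        simp only [List.headI, List.drop_one, List.tail_cons, List.zip_cons_cons, List.flatMap_cons]
        rw [← List.append_assoc, ← this]
        simp
    · have hcnt : t.count '?' = ps.length := by
        simp only [List.count_cons] at h
        rw [if_neg (by simpa using ha)] at h
        simpa using h
      rw [show mySplit pre (a::t) = mySplit (pre ++ [a]) t from by simp [mySplit, ha]]
      rw [show scanReplace (a::t) ps = a :: scanReplace t ps from by simp [scanReplace, ha]]
      rw [ih ps (pre ++ [a]) hcnt]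
      simp

theorem intercalate_nil_flatten (L : List (List Char)) : List.intercalate [] L = L.flatten := by
  induction L with
  | nil => simp [List.intercalate]
  | cons h t ih => cases t <;> simp_all [List.intercalate, List.intersperse]

theorem flatten_map_toList_flatMap (l : List (Option String)) :
    ∀ qs : List String,
    (((l.zip qs).flatMap (fun pq => [sqlLiteralPy pq.1, pq.2])).map String.toList).flatten
      = (l.zip (qs.map String.toList)).flatMap (fun pq => (sqlLiteralPy pq.1).toList ++ pq.2) := by
  induction l with
  | nil => intro qs; simp
  | cons p ps ih =>
    intro qs
    cases qs with
    | nil => simp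
    | cons q qs => simp [ih qs]

-- ===== VERDICT (by name: the statement is the Claim_ definition above) =====
theorem compile_param_sql_py_spec : Claim_equal_compile_param_sql_py := by
  intro sql params _
  unfold Spec_compile_param_sql_py compile_param_sql_py compile_param_sql_py_alt
  dsimp only
  generalize PySem.Str.join "\n" ((PySem.Str.splitlines (PySem.Str.strip sql)).map PySem.Str.rstrip) = nl
  have hq : ("?" : String).toList = ['?'] := rfl
  have hsplit : (PySem.Str.split? nl "?").getD [] = (mySplit [] nl.toList).map String.ofList := by
    simp only [PySem.Str.split?, PySem.Chars.split?, hq, PySem.Chars.splitOn]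
    rw [splitOnGo_char _ _ _ _ (Nat.le_succ _)]
    simp
  have hcount : PySem.Str.count nl "?" = nl.toList.count '?' := by
    simp only [PySem.Str.count, hq, PySem.Chars.count]
    rw [if_neg (by simp)]
    rw [countGo_char _ _ _ (le_refl _)]
    simp
  have hlen : ((mySplit [] nl.toList).map String.ofList).length - 1 = nl.toList.count '?' := by
    simp [mySplit_length]
  by_cases hc : nl.toList.count '?' = params.length
  · rw [hsplit, hcount]
    rw [if_neg (by rw [hlen]; simpa using hc), if_neg (by simpa using hc)]
    obtain ⟨hd, tl, hht⟩ : ∃ hd tl, mySplit ([] : List Char) nl.toList = hd :: tl := by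
      cases hms : mySplit ([] : List Char) nl.toList with
      | nil => exact absurd hms (mySplit_ne_nil nl.toList [])
      | cons h t2 => exact ⟨h, t2, rfl⟩
    have htl : tl.length = params.length := by
      have := mySplit_length nl.toList []
      rw [hht] at this; simp at this; omega
    rw [hht]
    rw [renderLoopA_eq _ _ 0 _ (by simp [htl])]
    have hkey := interleave_eq_scan nl.toList params [] hc
    rw [hht] at hkey
    simp only [List.headI, List.drop_one, List.tail_cons, List.nil_append] at hkey
    congr 1
    show PySem.Str.join "" _ = _
    simp only [PySem.Str.join, PySem.Chars.join, show ("" : String).toList = [] from rfl,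
      intercalate_nil_flatten]
    congr 1
    simp only [List.map_cons, List.drop_succ_cons, List.drop_zero, List.getD, List.getElem?_cons_zero,
      Option.getD_some, List.singleton_append, List.map_cons, List.flatten_cons, String.toList_ofList]
    rw [flatten_map_toList_flatMap]
    rw [List.map_map, show List.map (String.toList ∘ String.ofList) tl = tl from by
      simp [Function.comp_def]]
    exact hkey
  · rw [hsplit, hcount]
    rw [if_pos (by rw [hlen]; simpa using hc), if_pos (by simpa using hc)]
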